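-- pv_equiv track=rewrite | github.com/caioguiibsb/Calculadora-de-partidas-Rankeadas | Desafio.py | calcular_rank
-- ===== SOURCE A (Python) =====
-- def calcular_rank(vitorias, derrotas):
--     saldo = vitorias - derrotas
--
--     niveis = [
--         (10, "Ferro"),
--         (20, "Bronze"),
--         (50, "Prata"),
--         (80, "Ouro"),
--         (90, "Diamante"),
--         (100, "Lendário"),
--         (float('inf'), "Imortal")
--     ]
--
--     for limite, nome_nivel in niveis:
--         if vitorias <= limite:
--             return saldo, nome_nivel
-- ===== SOURCE B (Python) =====
-- def calcular_rank(vitorias, derrotas):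
--     limits = [10, 20, 50, 80, 90, 100]
--     names = ["Ferro", "Bronze", "Prata", "Ouro", "Diamante", "Lend\u00e1rio", "Imortal"]
--     lo, hi = 0, len(limits)
--     while lo < hi:
--         mid = (lo + hi) // 2
--         if limits[mid] < vitorias:
--             lo = mid + 1
--         else:
--             hi = mid
--     return vitorias - derrotas, names[lo]
-- ===== Notes on version B (the rewrite author's own statement) =====
-- stated objective: alternative
-- what changed: Replaces A's linear scan over the (limit, name) pairs by a hand-written binary search (bisect_left) over a bare threshold list, indexing a parallel name table with the resulting index.
import Mathlib
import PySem

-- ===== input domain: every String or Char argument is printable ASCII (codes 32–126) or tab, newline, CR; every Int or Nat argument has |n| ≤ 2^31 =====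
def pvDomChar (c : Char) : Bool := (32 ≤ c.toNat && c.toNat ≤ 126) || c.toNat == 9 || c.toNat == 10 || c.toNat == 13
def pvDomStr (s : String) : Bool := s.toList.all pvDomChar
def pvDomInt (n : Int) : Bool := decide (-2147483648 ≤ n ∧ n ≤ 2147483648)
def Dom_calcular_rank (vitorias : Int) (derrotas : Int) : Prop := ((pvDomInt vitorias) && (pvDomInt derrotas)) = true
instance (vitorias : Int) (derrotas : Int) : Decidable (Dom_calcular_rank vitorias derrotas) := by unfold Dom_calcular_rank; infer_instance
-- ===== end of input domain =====

-- B replaces A's linear scan of (limit, name) pairs by a binary search over a threshold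
-- list with a parallel name table (alternative decomposition, same cost on 7 tiers).

-- ===== PORT A =====
-- scan of A's `for limite, nome_nivel in niveis` loop; the trailing (float('inf'), "Imortal")
-- entry always satisfies `vitorias <= limite`, so it is the [] fallback here.
def rankScan (vitorias saldo : Int) : List (Int × String) → Int × String
  | [] => (saldo, "Imortal")
  | (limite, nome) :: rest =>
      if vitorias ≤ limite then (saldo, nome) else rankScan vitorias saldo rest

def calcular_rank (vitorias : Int) (derrotas : Int) : Int × String :=
  let saldo := vitorias - derrotas
  rankScan vitorias saldo
    [(10, "Ferro"), (20, "Bronze"), (50, "Prata"), (80, "Ouro"), (90, "Diamante"), (100, "Lendário")]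

-- ===== PORT B =====
-- Source B's while-loop binary search; fuel (= list length) only makes the loop total,
-- it is never exhausted.
def bisectLoop (xs : List Int) (x : Int) : Nat → Nat → Nat → Nat
  | 0, lo, _ => lo
  | fuel + 1, lo, hi =>
      if lo < hi then
        let mid := (lo + hi) / 2
        if xs.getD mid 0 < x then bisectLoop xs x fuel (mid + 1) hi
        else bisectLoop xs x fuel lo mid
      else lo

def calcular_rank_alt (vitorias : Int) (derrotas : Int) : Int × String :=
  let limits : List Int := [10, 20, 50, 80, 90, 100]
  let names : List String := ["Ferro", "Bronze", "Prata", "Ouro", "Diamante", "Lendário", "Imortal"]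
  let lo := bisectLoop limits vitorias limits.length 0 limits.length
  (vitorias - derrotas, names.getD lo "")

-- ===== PRECONDITION & SPEC =====
def Spec_calcular_rank (vitorias : Int) (derrotas : Int) (out : Int × String) : Prop := out = calcular_rank_alt vitorias derrotas
instance (vitorias : Int) (derrotas : Int) (out : Int × String) : Decidable (Spec_calcular_rank vitorias derrotas out) := by unfold Spec_calcular_rank; infer_instance

-- ===== CLAIM (what is proved, stated in full; the proofs are below) =====
def Claim_equal_calcular_rank : Prop := ∀ (vitorias : Int) (derrotas : Int), Dom_calcular_rank vitorias derrotas → Spec_calcular_rank vitorias derrotas (calcular_rank vitorias derrotas)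

-- ===== LEMMAS AND PROOFS =====

-- ===== VERDICT (by name: the statement is the Claim_ definition above) =====
theorem calcular_rank_spec : Claim_equal_calcular_rank := by
  intro v d _
  unfold Spec_calcular_rank calcular_rank calcular_rank_alt
  rcases le_or_gt v 10 with h1 | h1
  · simp [rankScan, bisectLoop, h1, show ¬(80:Int) < v by omega,
      show ¬(20:Int) < v by omega, show ¬(10:Int) < v by omega]
  rcases le_or_gt v 20 with h2 | h2
  · simp [rankScan, bisectLoop, h2, h1, show ¬(80:Int) < v by omega,
      show ¬(20:Int) < v by omega, show ¬v ≤ 10 by omega]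
  rcases le_or_gt v 50 with h3 | h3
  · simp [rankScan, bisectLoop, h3, show ¬(80:Int) < v by omega,
      show (20:Int) < v from h2, show ¬(50:Int) < v by omega,
      show ¬v ≤ 10 by omega, show ¬v ≤ 20 by omega]
  rcases le_or_gt v 80 with h4 | h4
  · simp [rankScan, bisectLoop, h4, show ¬(80:Int) < v by omega,
      show (20:Int) < v by omega, show (50:Int) < v from h3,
      show ¬v ≤ 10 by omega, show ¬v ≤ 20 by omega, show ¬v ≤ 50 by omega]
  rcases le_or_gt v 90 with h5 | h5
  · simp [rankScan, bisectLoop, h5, show (80:Int) < v from h4,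
      show ¬(90:Int) < v by omega, show ¬(100:Int) < v by omega,
      show ¬v ≤ 10 by omega, show ¬v ≤ 20 by omega, show ¬v ≤ 50 by omega,
      show ¬v ≤ 80 by omega]
  rcases le_or_gt v 100 with h6 | h6
  · simp [rankScan, bisectLoop, h6, show (80:Int) < v by omega,
      show (90:Int) < v from h5, show ¬(100:Int) < v by omega,
      show ¬v ≤ 10 by omega, show ¬v ≤ 20 by omega, show ¬v ≤ 50 by omega,
      show ¬v ≤ 80 by omega, show ¬v ≤ 90 by omega]
  · simp [rankScan, bisectLoop, show (80:Int) < v by omega,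
      show (100:Int) < v from h6,
      show ¬v ≤ 10 by omega, show ¬v ≤ 20 by omega, show ¬v ≤ 50 by omega,
      show ¬v ≤ 80 by omega, show ¬v ≤ 90 by omega, show ¬v ≤ 100 by omega]
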